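-- pv_equiv track=rewrite | github.com/tracy-talent/AIPolicy | pasaie/utils/entity_extract.py | extract_kvpairs_in_bmoes
-- ===== SOURCE A (Python) =====
-- def extract_kvpairs_in_bmoes(bmoes_seq, word_seq):
--     assert len(bmoes_seq) == len(word_seq)
--     pairs = list()
--     pre_bmoes = "O"
--     v = ""
--     spos = -1
--     for i, bmoes in enumerate(bmoes_seq):
--         word = word_seq[i]
--         if bmoes == "O":
--             v = ""
--         elif bmoes[0] == "B":
--             v = word[2:] if word.startswith('##') else word
--             spos = i
--         elif bmoes[0] == "M":
--             if pre_bmoes[0] in "OES" or pre_bmoes[2:] != bmoes[2:] or v == "":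
--                 v = ""
--             else:
--                 v += word[2:] if word.startswith('##') else word
--         elif bmoes[0] == 'E':
--             if pre_bmoes[0] in 'BM' and pre_bmoes[2:] == bmoes[2:] and v != "":
--                 v += word[2:] if word.startswith('##') else word
--                 pairs.append(((spos, i + 1), bmoes[2:], v))
--             v = ""
--         elif bmoes[0] == 'S':
--             v = word[2:] if word.startswith('##') else word
--             pairs.append(((i, i + 1), bmoes[2:], v))
--             v = ""
--         pre_bmoes = bmoes
--     return pairs
-- ===== SOURCE B (Python) =====
-- def extract_kvpairs_in_bmoes(bmoes_seq, word_seq):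
--     assert len(bmoes_seq) == len(word_seq)
--     n = len(bmoes_seq)
--
--     def strip(w):
--         return w[2:] if w.startswith('##') else w
--
--     pairs = []
--     i = 0
--     while i < n:
--         tag = bmoes_seq[i]
--         if tag == "O":
--             i += 1
--             continue
--         c = tag[0]
--         if c == 'S':
--             pairs.append(((i, i + 1), tag[2:], strip(word_seq[i])))
--             i += 1
--         elif c == 'B':
--             start = i
--             prev = tag
--             acc = strip(word_seq[i])
--             j = i + 1
--             while j < n:
--                 tj = bmoes_seq[j]
--                 if tj == "O":
--                     j += 1
--                     break
--                 cj = tj[0]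
--                 if cj == 'B':
--                     break  # re-anchor the outer scan here
--                 if cj == 'S':
--                     pairs.append(((j, j + 1), tj[2:], strip(word_seq[j])))
--                     j += 1
--                     break
--                 if cj == 'M':
--                     if prev[0] in "OES" or prev[2:] != tj[2:] or acc == "":
--                         j += 1
--                         break
--                     acc += strip(word_seq[j])
--                     prev = tj
--                     j += 1
--                     continue
--                 if cj == 'E':
--                     if prev[0] in "BM" and prev[2:] == tj[2:] and acc != "":
--                         pairs.append(((start, j + 1), tj[2:], acc + strip(word_seq[j])))
--                     j += 1
--                     break
--                 # unrecognised tag: carried through the segment without contributing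
--                 prev = tj
--                 j += 1
--             i = j
--         else:
--             i += 1  # 'M'/'E'/other outside a segment contribute nothing
--     return pairs
-- ===== Notes on version B (the rewrite author's own statement) =====
-- stated objective: alternative
-- what changed: A's single-pass state machine threading pre_bmoes/v/spos across every iteration is replaced by an index-driven segment scanner: an outer loop that skips non-segment tags and emits 'S' spans directly, and a nested run loop entered at each 'B' that accumulates the segment and returns the resume position.
-- outside the precondition, e.g. on extract_kvpairs_in_bmoes(['B-a', ''], ['x', 'y']): A raises IndexError, B raises IndexError; on extract_kvpairs_in_bmoes(['S-a'], []): A raises AssertionError, B raises AssertionError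
import Mathlib
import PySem

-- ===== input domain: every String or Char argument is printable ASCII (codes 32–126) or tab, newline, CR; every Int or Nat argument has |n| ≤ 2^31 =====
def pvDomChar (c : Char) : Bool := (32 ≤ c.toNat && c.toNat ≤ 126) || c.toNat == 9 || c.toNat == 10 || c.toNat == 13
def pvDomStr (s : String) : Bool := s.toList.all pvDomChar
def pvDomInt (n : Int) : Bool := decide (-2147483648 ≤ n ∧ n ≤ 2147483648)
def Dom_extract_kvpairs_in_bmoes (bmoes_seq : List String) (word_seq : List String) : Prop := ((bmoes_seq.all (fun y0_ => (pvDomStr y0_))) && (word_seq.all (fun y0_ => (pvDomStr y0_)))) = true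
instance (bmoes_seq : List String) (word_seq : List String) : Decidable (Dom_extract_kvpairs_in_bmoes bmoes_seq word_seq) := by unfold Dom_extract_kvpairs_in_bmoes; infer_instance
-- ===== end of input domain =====

-- B replaces A's single-pass state machine (pre_bmoes/v/spos threaded across the whole loop) by an
-- index-driven segment scanner with a nested run loop that emits spans directly; alternative, not faster.

-- ===== PORT A =====
-- shared text helpers (both Pythons contain these very expressions):
-- Python tag[2:]
def pvTyp (t : List Char) : List Char := t.drop 2
-- Python: word[2:] if word.startswith('##') else word
def pvStrip (w : List Char) : List Char := if w.take 2 = ['#', '#'] then w.drop 2 else w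
-- Python pre_bmoes[0] in "OES" (pre is nonempty under Pre_; headD ' ' is a totality guard)
def pvInOES (pre : List Char) : Bool := pre.headD ' ' == 'O' || pre.headD ' ' == 'E' || pre.headD ' ' == 'S'
-- Python pre_bmoes[0] in "BM"
def pvInBM (pre : List Char) : Bool := pre.headD ' ' == 'B' || pre.headD ' ' == 'M'

-- A's loop over (bmoes_seq, word_seq) in parallel with state (i, pre_bmoes, v, spos);
-- pairs.append(x) becomes emitting x in front of the rest of the recursion (same order).
-- t.headD ' ' guards the empty tag, on which Python raises IndexError (excluded by Pre_);
-- ws.headD [] guards word_seq shorter than bmoes_seq (IndexError, excluded by Pre_).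
def pvALoop : List (List Char) → List (List Char) → Int → List Char → List Char → Int →
    List ((Int × Int) × String × String)
  | [], _, _, _, _, _ => []
  | t :: ts, ws, i, pre, v, spos =>
    let w := ws.headD []
    if t = ['O'] then
      pvALoop ts ws.tail (i + 1) t [] spos
    else if t.headD ' ' = 'B' then
      pvALoop ts ws.tail (i + 1) t (pvStrip w) i
    else if t.headD ' ' = 'M' then
      if pvInOES pre || pvTyp pre != pvTyp t || v == [] then
        pvALoop ts ws.tail (i + 1) t [] spos
      else
        pvALoop ts ws.tail (i + 1) t (v ++ pvStrip w) spos
    else if t.headD ' ' = 'E' then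
      if pvInBM pre && pvTyp pre == pvTyp t && v != [] then
        ((spos, i + 1), String.ofList (pvTyp t), String.ofList (v ++ pvStrip w)) ::
          pvALoop ts ws.tail (i + 1) t [] spos
      else
        pvALoop ts ws.tail (i + 1) t [] spos
    else if t.headD ' ' = 'S' then
      ((i, i + 1), String.ofList (pvTyp t), String.ofList (pvStrip w)) ::
        pvALoop ts ws.tail (i + 1) t [] spos
    else
      pvALoop ts ws.tail (i + 1) t v spos

def extract_kvpairs_in_bmoes (bmoes_seq : List String) (word_seq : List String) :
    List ((Int × Int) × String × String) :=
  pvALoop (bmoes_seq.map String.toList) (word_seq.map String.toList) 0 ['O'] [] (-1)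

-- ===== PORT B =====
-- inner run loop: scans a segment opened by a 'B' tag; returns (emitted pairs, remaining tags,
-- remaining words, index to resume the outer scan at).
def pvBInner : List (List Char) → List (List Char) → Int → Int → List Char → List Char →
    (List ((Int × Int) × String × String) × List (List Char) × List (List Char) × Int)
  | [], _, j, _, _, _ => ([], [], [], j)
  | t :: ts, ws, j, start, prev, acc =>
    let w := ws.headD []
    if t = ['O'] then
      ([], ts, ws.tail, j + 1)
    else if t.headD ' ' = 'B' then
      ([], t :: ts, ws, j)   -- re-anchor the outer scan here
    else if t.headD ' ' = 'S' then
      ([((j, j + 1), String.ofList (pvTyp t), String.ofList (pvStrip w))], ts, ws.tail, j + 1)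
    else if t.headD ' ' = 'M' then
      if pvInOES prev || pvTyp prev != pvTyp t || acc == [] then
        ([], ts, ws.tail, j + 1)
      else
        pvBInner ts ws.tail (j + 1) start t (acc ++ pvStrip w)
    else if t.headD ' ' = 'E' then
      if pvInBM prev && pvTyp prev == pvTyp t && acc != [] then
        ([((start, j + 1), String.ofList (pvTyp t), String.ofList (acc ++ pvStrip w))], ts, ws.tail, j + 1)
      else
        ([], ts, ws.tail, j + 1)
    else
      pvBInner ts ws.tail (j + 1) start t acc   -- unrecognised tag: carried through the segment

-- the inner loop never returns more tags than it was given (termination of the outer scan)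
theorem pvBInner_len_le : ∀ (ts ws : List (List Char)) (j start : Int) (prev acc : List Char),
    (pvBInner ts ws j start prev acc).2.1.length ≤ ts.length := by
  intro ts
  induction ts with
  | nil => intro ws j start prev acc; simp [pvBInner]
  | cons t ts ih =>
    intro ws j start prev acc
    simp only [pvBInner]
    split_ifs <;> simp <;> exact Nat.le_succ_of_le (ih ..)

-- outer scan: 'O' and stray 'M'/'E'/unrecognised tags are skipped, 'S' emits a singleton span,
-- 'B' hands over to the inner run loop and resumes where it stopped.
def pvBOuter : List (List Char) → List (List Char) → Int → List ((Int × Int) × String × String)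
  | [], _, _ => []
  | t :: ts, ws, i =>
    let w := ws.headD []
    if t = ['O'] then
      pvBOuter ts ws.tail (i + 1)
    else if t.headD ' ' = 'S' then
      ((i, i + 1), String.ofList (pvTyp t), String.ofList (pvStrip w)) :: pvBOuter ts ws.tail (i + 1)
    else if t.headD ' ' = 'B' then
      let r := pvBInner ts ws.tail (i + 1) i t (pvStrip w)
      r.1 ++ pvBOuter r.2.1 r.2.2.1 r.2.2.2
    else
      pvBOuter ts ws.tail (i + 1)
  termination_by ts _ _ => ts.length
  decreasing_by
    all_goals first
      | (simp only [List.length_cons]; omega)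
      | (have := pvBInner_len_le ts ws.tail (i + 1) i t (pvStrip (ws.headD []));
         simp only [List.length_cons]; omega)

def extract_kvpairs_in_bmoes_alt (bmoes_seq : List String) (word_seq : List String) :
    List ((Int × Int) × String × String) :=
  pvBOuter (bmoes_seq.map String.toList) (word_seq.map String.toList) 0

-- ===== PRECONDITION & SPEC =====
-- Pre_ excludes exactly the inputs on which Python A raises: unequal lengths (AssertionError)
-- and an empty tag string (IndexError on bmoes[0]).
def Pre_extract_kvpairs_in_bmoes (bmoes_seq : List String) (word_seq : List String) : Prop :=
  bmoes_seq.length = word_seq.length ∧ ∀ t ∈ bmoes_seq, t ≠ ""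
instance (bmoes_seq : List String) (word_seq : List String) : Decidable (Pre_extract_kvpairs_in_bmoes bmoes_seq word_seq) := by unfold Pre_extract_kvpairs_in_bmoes; infer_instance

def pvWitness_extract_kvpairs_in_bmoes : List String × List String :=
  (["B-a", "M-a", "E-a", "O", "S-b"], ["fo", "##o", "bar", "x", "##y"])

def Spec_extract_kvpairs_in_bmoes (bmoes_seq : List String) (word_seq : List String) (out : List ((Int × Int) × String × String)) : Prop := out = extract_kvpairs_in_bmoes_alt bmoes_seq word_seq
instance (bmoes_seq : List String) (word_seq : List String) (out : List ((Int × Int) × String × String)) : Decidable (Spec_extract_kvpairs_in_bmoes bmoes_seq word_seq out) := by unfold Spec_extract_kvpairs_in_bmoes; infer_instance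

-- ===== CLAIM (what is proved, stated in full; the proofs are below) =====
def Claim_equal_extract_kvpairs_in_bmoes : Prop := ∀ (bmoes_seq : List String) (word_seq : List String), Dom_extract_kvpairs_in_bmoes bmoes_seq word_seq → Pre_extract_kvpairs_in_bmoes bmoes_seq word_seq → Spec_extract_kvpairs_in_bmoes bmoes_seq word_seq (extract_kvpairs_in_bmoes bmoes_seq word_seq)

-- ===== LEMMAS AND PROOFS =====

-- Joint invariant, by strong induction on the number of remaining tags:
-- (1) outside a segment A's state has v = [] and its result ignores pre/spos: it equals B's outer scan;
-- (2) inside a segment A's loop equals B's inner run loop followed by the resumed outer scan.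
theorem pv_main : ∀ (n : Nat) (ts ws : List (List Char)), ts.length ≤ n →
    (∀ (i : Int) (pre : List Char) (spos : Int), pvALoop ts ws i pre [] spos = pvBOuter ts ws i) ∧
    (∀ (j start : Int) (prev acc : List Char),
      pvALoop ts ws j prev acc start =
        (pvBInner ts ws j start prev acc).1 ++
          pvBOuter (pvBInner ts ws j start prev acc).2.1
            (pvBInner ts ws j start prev acc).2.2.1
            (pvBInner ts ws j start prev acc).2.2.2) := by
  intro n
  induction n with
  | zero =>
    intro ts ws h
    have : ts = [] := List.length_eq_zero_iff.mp (Nat.le_zero.mp h)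
    subst this
    constructor
    · intro i pre spos; simp [pvALoop, pvBOuter]
    · intro j start prev acc; simp [pvALoop, pvBInner, pvBOuter]
  | succ n ih =>
    intro ts ws h
    cases ts with
    | nil =>
      constructor
      · intro i pre spos; simp [pvALoop, pvBOuter]
      · intro j start prev acc; simp [pvALoop, pvBInner, pvBOuter]
    | cons t ts =>
      have hts : ts.length ≤ n := by simpa using h
      have IH1 := (ih ts ws.tail hts).1
      have IH2 := (ih ts ws.tail hts).2
      constructor
      · -- (1): outside a segment (A's v is [])
        intro i pre spos
        by_cases hO : t = ['O']
        · subst hO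
          simpa [pvALoop, pvBOuter] using IH1 (i + 1) ['O'] spos
        · by_cases hB : t.head?.getD ' ' = 'B'
          · -- enter a segment: inner-loop invariant
            simpa [pvALoop, pvBOuter, hO, hB] using
              IH2 (i + 1) i t (pvStrip (ws.head?.getD []))
          · by_cases hM : t.head?.getD ' ' = 'M'
            · -- v = [] makes A's reset condition true
              simpa [pvALoop, pvBOuter, hO, hB, hM] using IH1 (i + 1) t spos
            · by_cases hE : t.head?.getD ' ' = 'E'
              · -- v = [] blocks A's emission
                simpa [pvALoop, pvBOuter, hO, hB, hM, hE] using IH1 (i + 1) t spos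
              · by_cases hS : t.head?.getD ' ' = 'S'
                · simpa [pvALoop, pvBOuter, hO, hB, hM, hE, hS] using IH1 (i + 1) t spos
                · simpa [pvALoop, pvBOuter, hO, hB, hM, hE, hS] using IH1 (i + 1) t spos
      · -- (2): inside a segment
        intro j start prev acc
        by_cases hO : t = ['O']
        · subst hO
          simpa [pvALoop, pvBInner, pvBOuter] using IH1 (j + 1) ['O'] start
        · by_cases hB : t.head?.getD ' ' = 'B'
          · -- re-anchor: B's outer scan restarts on the very same 'B' tag
            simpa [pvALoop, pvBInner, pvBOuter, hO, hB] using
              IH2 (j + 1) j t (pvStrip (ws.head?.getD []))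
          · by_cases hM : t.head?.getD ' ' = 'M'
            · -- 'M': the reset condition is the same on both sides
              simp [pvALoop, pvBInner, hO, hM]
              split_ifs with hc
              · -- dead 'M': both sides abandon the segment
                simpa using IH1 (j + 1) t start
              · simpa using IH2 (j + 1) start t (acc ++ pvStrip (ws.head?.getD []))
            · by_cases hE : t.head?.getD ' ' = 'E'
              · -- 'E': the emission condition is the same on both sides
                simp [pvALoop, pvBInner, hO, hE]
                split_ifs with hc
                · -- matching 'E': both emit the same span and value
                  simpa using IH1 (j + 1) t start
                · simpa using IH1 (j + 1) t start
              · by_cases hS : t.head?.getD ' ' = 'S'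
                · -- 'S' inside a segment ends it with a singleton emission
                  simpa [pvALoop, pvBInner, pvBOuter, hO, hB, hM, hE, hS] using IH1 (j + 1) t start
                · -- unrecognised tag: both sides carry the segment on
                  simpa [pvALoop, pvBInner, pvBOuter, hO, hB, hM, hE, hS] using
                    IH2 (j + 1) start t acc

-- ===== VERDICT (by name: the statement is the Claim_ definition above) =====
theorem extract_kvpairs_in_bmoes_spec : Claim_equal_extract_kvpairs_in_bmoes := by
  intro bmoes_seq word_seq _ _
  unfold Spec_extract_kvpairs_in_bmoes extract_kvpairs_in_bmoes extract_kvpairs_in_bmoes_alt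
  exact (pv_main (bmoes_seq.map String.toList).length _ _ le_rfl).1 0 ['O'] (-1)
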